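-- pv_equiv track=rewrite | github.com/riskiest/sums_of_three_cubes | solution.py | multivalued_chinese_remainder
-- ===== SOURCE A (Python) =====
-- from functools import reduce
-- import itertools
--
-- def extended_euclidean_algorithm(a, b):
--     """return (g, x, y) such that a*x + b*y = g = gcd(a, b) where a,b>=1"""
--     x0, x1, y0, y1 = 0, 1, 1, 0
--     while a != 0:
--         q, b, a = b // a, a, b % a
--         y0, y1 = y1, y0 - q * y1
--         x0, x1 = x1, x0 - q * x1
--     return b, x0, y0
--
-- def modulo_inv(a, b):
--     """return a^(-1) mod b
--     or x such that  (x * a) == 1 (mod b)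
--     or x*a + b*y = 1
--     still need a,b>=1"""
--     g, x, _ = extended_euclidean_algorithm(a, b)
--     if g==1:
--         return x % b
--     return False
--
-- def multivalued_chinese_remainder(n, a, prod = None):
--     '''x == (a_i = [...]) (mod n_i)
--         求x
--         x = sum(ga_i*s_i*(prod/n_i)), where
--         prod = n_1* n_2*..., ga为a_i笛卡尔积的一项，ga_i为ga的第i项，
--         s_i = (prod/n_i)^-1 (mod n_i)，程序中
--         coeff = s_i*(prod/n_i)
--     '''
--     prod = reduce(lambda a, b: a*b, n) if prod is None else prod
--     for a_i in a:
--         if not len(a_i):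
--             return [], 1
--
--     coeffs = []
--     for n_i in n:
--         coeff = prod // n_i
--         coeffs.append(modulo_inv(coeff, n_i)*coeff)
--
--     xs = [sum([a_perm_i * coeff for a_perm_i, coeff in zip(a_perm, coeffs)])%prod
--         for a_perm in itertools.product(*a)]
--     return xs, prod
-- ===== SOURCE B (Python) =====
-- def _egcd(a, b):
--     """recursive extended gcd: returns (g, x, y) with a*x + b*y = g"""
--     if a == 0:
--         return b, 0, 1
--     g, x, y = _egcd(b % a, a)
--     return g, y - (b // a) * x, x
--
-- def _inv(a, b):
--     """a^(-1) mod b, or 0 when a is not invertible mod b"""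
--     g, x, _ = _egcd(a, b)
--     return x % b if g == 1 else 0
--
-- def multivalued_chinese_remainder(n, a, prod=None):
--     if prod is None:
--         prod = n[0]
--         for n_i in n[1:]:
--             prod *= n_i
--     if any(len(a_i) == 0 for a_i in a):
--         return [], 1
--     coeffs = [_inv(prod // n_i, n_i) * (prod // n_i) for n_i in n]
--     # DP over the moduli: extend every partial sum by each residue choice,
--     # in the same order itertools.product enumerates tuples
--     sums = [0]
--     for a_i, c in zip(a, coeffs):
--         sums = [s + v * c for s in sums for v in a_i]
--     return [s % prod for s in sums], prod
-- ===== Notes on version B (the rewrite author's own statement) =====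
-- stated objective: alternative
-- what changed: Replaces the per-tuple dot product over itertools.product with an incremental DP that extends prefix sums one modulus at a time in product order (saving the factor-k inner zip/sum per tuple), and uses a recursive extended gcd instead of the iterative accumulator version.
-- outside the precondition, e.g. on multivalued_chinese_remainder([2], [[0], [0, 1]], None): A returns ([0, 0], 2), B returns ([0], 2); on multivalued_chinese_remainder([0], [[1]], None): A raises ZeroDivisionError, B raises ZeroDivisionError; on multivalued_chinese_remainder([], [], None): A raises TypeError, B raises IndexError
import Mathlib
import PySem

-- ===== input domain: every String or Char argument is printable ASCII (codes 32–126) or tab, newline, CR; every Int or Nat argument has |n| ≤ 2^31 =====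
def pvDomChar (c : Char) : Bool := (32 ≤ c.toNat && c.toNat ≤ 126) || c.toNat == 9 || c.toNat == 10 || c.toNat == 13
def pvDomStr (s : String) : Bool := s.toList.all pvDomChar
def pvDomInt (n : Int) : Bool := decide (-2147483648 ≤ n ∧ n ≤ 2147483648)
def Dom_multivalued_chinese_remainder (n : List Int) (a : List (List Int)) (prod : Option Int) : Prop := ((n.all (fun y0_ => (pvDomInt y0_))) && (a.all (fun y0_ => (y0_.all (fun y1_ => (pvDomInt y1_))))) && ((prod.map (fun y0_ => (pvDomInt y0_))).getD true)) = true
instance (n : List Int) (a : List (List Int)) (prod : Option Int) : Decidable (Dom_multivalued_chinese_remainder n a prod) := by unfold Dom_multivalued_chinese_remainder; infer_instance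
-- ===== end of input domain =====

-- B replaces the per-tuple dot product over the full Cartesian product with an
-- incremental DP extending prefix sums one modulus at a time in product order, and a
-- recursive extended gcd replaces the iterative accumulator one.

-- termination measure for both gcd loops (cited by name in decreasing_by)
theorem pvModNatAbsLt (b a : Int) (h : ¬ a = 0) : (PySem.Int.mod b a).natAbs < a.natAbs := by
  rcases lt_or_gt_of_ne h with hneg | hpos
  · have := PySem.Int.mod_neg_bounds b hneg
    omega
  · have h1 := PySem.Int.mod_nonneg b hpos
    have h2 := PySem.Int.mod_lt b hpos
    omega

-- ===== PORT A =====
-- while-loop of extended_euclidean_algorithm; state (a, b, x0, x1, y0, y1)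
def pvEEA (a b x0 x1 y0 y1 : Int) : Int × Int × Int :=
  if h : a = 0 then (b, x0, y0)
  else
    let q := PySem.Int.floordiv b a
    pvEEA (PySem.Int.mod b a) a x1 (x0 - q * x1) y1 (y0 - q * y1)
termination_by a.natAbs
decreasing_by exact pvModNatAbsLt b a h

-- Python's `return False` flows into an int multiplication, where False == 0
def modulo_inv (a b : Int) : Int :=
  let r := pvEEA a b 0 1 1 0
  if r.1 = 1 then PySem.Int.mod r.2.1 b else 0

-- itertools.product(*a): first coordinate varies slowest
def pyProduct (a : List (List Int)) : List (List Int) :=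
  match a with
  | [] => [[]]
  | l :: rest => l.flatMap (fun x => (pyProduct rest).map (fun t => x :: t))

def multivalued_chinese_remainder (n : List Int) (a : List (List Int)) (prod : Option Int) : List Int × Int :=
  let p := match prod with
    | none => match n with
      | [] => 0   -- Python's reduce raises TypeError on []; excluded by Pre_
      | h :: t => t.foldl (fun x y => x * y) h
    | some p0 => p0
  if a.any (fun ai => ai.isEmpty) then ([], 1)
  else
    let coeffs := n.foldl (fun acc ni =>
      let c := PySem.Int.floordiv p ni
      acc ++ [modulo_inv c ni * c]) []
    let xs := (pyProduct a).map (fun t =>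
      PySem.Int.mod (((t.zip coeffs).map (fun pr => pr.1 * pr.2)).sum) p)
    (xs, p)

-- ===== PORT B =====
def pvEgcd (a b : Int) : Int × Int × Int :=
  if h : a = 0 then (b, 0, 1)
  else
    let r := pvEgcd (PySem.Int.mod b a) a
    (r.1, r.2.2 - PySem.Int.floordiv b a * r.2.1, r.2.1)
termination_by a.natAbs
decreasing_by exact pvModNatAbsLt b a h

def pvInv (a b : Int) : Int :=
  let r := pvEgcd a b
  if r.1 = 1 then PySem.Int.mod r.2.1 b else 0

def multivalued_chinese_remainder_alt (n : List Int) (a : List (List Int)) (prod : Option Int) : List Int × Int :=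
  let p := match prod with
    | none => match n with
      | [] => 0   -- Source B's n[0] raises IndexError on []; excluded by Pre_
      | h :: t => t.foldl (fun x y => x * y) h
    | some p0 => p0
  if a.any (fun ai => ai.length == 0) then ([], 1)
  else
    let coeffs := n.map (fun ni => pvInv (PySem.Int.floordiv p ni) ni * PySem.Int.floordiv p ni)
    let sums := (a.zip coeffs).foldl
      (fun sums pr => sums.flatMap (fun s => pr.1.map (fun v => s + v * pr.2))) [0]
    (sums.map (fun s => PySem.Int.mod s p), p)

-- ===== PRECONDITION & SPEC =====
-- Pre_ excludes (i) the inputs where A raises: empty n with prod=None (reduce TypeError),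
-- a zero modulus or a zero effective product reached without any empty residue list
-- (ZeroDivisionError); and (ii) inputs with a non-singleton residue list beyond the moduli,
-- on which A still returns but its zip silently truncates the dot product while the product
-- still enumerates the extra choices, duplicating each sum — an accidental behaviour of
-- mismatched arities.
def Pre_multivalued_chinese_remainder (n : List Int) (a : List (List Int)) (prod : Option Int) : Prop :=
  (prod = none → n ≠ []) ∧
  ((∃ ai ∈ a, ai = []) ∨
    ((∀ x ∈ n, x ≠ 0) ∧ (∀ p0, prod = some p0 → p0 ≠ 0) ∧
      (∀ ai ∈ a.drop n.length, ai.length = 1)))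
instance (n : List Int) (a : List (List Int)) (prod : Option Int) : Decidable (Pre_multivalued_chinese_remainder n a prod) := by unfold Pre_multivalued_chinese_remainder; infer_instance

def pvWitness_multivalued_chinese_remainder : List Int × List (List Int) × Option Int :=
  ([3, 5], [[1, 2], [3]], none)

def Spec_multivalued_chinese_remainder (n : List Int) (a : List (List Int)) (prod : Option Int) (out : List Int × Int) : Prop := out = multivalued_chinese_remainder_alt n a prod
instance (n : List Int) (a : List (List Int)) (prod : Option Int) (out : List Int × Int) : Decidable (Spec_multivalued_chinese_remainder n a prod out) := by unfold Spec_multivalued_chinese_remainder; infer_instance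

-- ===== CLAIM (what is proved, stated in full; the proofs are below) =====
def Claim_equal_multivalued_chinese_remainder : Prop := ∀ (n : List Int) (a : List (List Int)) (prod : Option Int), Dom_multivalued_chinese_remainder n a prod → Pre_multivalued_chinese_remainder n a prod → Spec_multivalued_chinese_remainder n a prod (multivalued_chinese_remainder n a prod)

-- ===== LEMMAS AND PROOFS =====

-- the iterative accumulators of A's gcd are the Bézout pair of B's recursive gcd
theorem pvEEA_eq (a b x0 x1 y0 y1 : Int) :
    pvEEA a b x0 x1 y0 y1 =
      ((pvEgcd a b).1, (pvEgcd a b).2.1 * x1 + (pvEgcd a b).2.2 * x0,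
       (pvEgcd a b).2.1 * y1 + (pvEgcd a b).2.2 * y0) := by
  fun_induction pvEEA a b x0 x1 y0 y1 with
  | case1 b x0 x1 y0 y1 => simp [pvEgcd]
  | case2 a b x0 x1 y0 y1 h q ih =>
    rw [ih]
    have hg : pvEgcd a b = ((pvEgcd (PySem.Int.mod b a) a).1,
        (pvEgcd (PySem.Int.mod b a) a).2.2 - PySem.Int.floordiv b a * (pvEgcd (PySem.Int.mod b a) a).2.1,
        (pvEgcd (PySem.Int.mod b a) a).2.1) := by
      rw [pvEgcd]; simp [h]
    rw [hg]
    simp only [q]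
    ring_nf

theorem modulo_inv_eq (a b : Int) : modulo_inv a b = pvInv a b := by
  simp [modulo_inv, pvInv, pvEEA_eq]

-- zip truncates at the shorter list, split across an append
theorem pvZipAppend {α β : Type} (l1 l2 : List α) (l3 : List β) :
    (l1 ++ l2).zip l3 = l1.zip l3 ++ l2.zip (l3.drop l1.length) := by
  induction l1 generalizing l3 with
  | nil => simp
  | cons x xs ih =>
    cases l3 with
    | nil => simp
    | cons c cs => simp [ih]

theorem pvProdLen (a : List (List Int)) (t : List Int) (h : t ∈ pyProduct a) :
    t.length = a.length := by
  induction a generalizing t with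
  | nil => simp [pyProduct] at h; simp [h]
  | cons a1 rest ih =>
    simp [pyProduct] at h
    obtain ⟨x, -, t', ht', rfl⟩ := h
    simp [ih t' ht']

theorem pvProdSingles (a : List (List Int)) (h : ∀ ai ∈ a, ai.length = 1) :
    ∃ u, pyProduct a = [u] := by
  induction a with
  | nil => exact ⟨[], rfl⟩
  | cons a1 rest ih =>
    obtain ⟨u, hu⟩ := ih (fun ai hai => h ai (by simp [hai]))
    obtain ⟨x, hx⟩ := List.length_eq_one_iff.mp (h a1 (by simp))
    exact ⟨x :: u, by simp [pyProduct, hx, hu]⟩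

theorem pvProdAppend (a1 a2 : List (List Int)) :
    pyProduct (a1 ++ a2) = (pyProduct a1).flatMap (fun t => (pyProduct a2).map (fun u => t ++ u)) := by
  induction a1 with
  | nil => simp [pyProduct]
  | cons l rest ih =>
    simp [pyProduct, ih, List.flatMap_assoc, List.map_flatMap, List.flatMap_map, List.map_map,
      Function.comp_def]

-- the DP over zipped (residues, coeff) prefixes equals the dot-product map over the product
theorem pvDp_eq (a : List (List Int)) (coeffs acc : List Int)
    (h : a.length ≤ coeffs.length) :
    (a.zip coeffs).foldl
        (fun sums pr => sums.flatMap (fun s => pr.1.map (fun v => s + v * pr.2))) acc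
      = acc.flatMap (fun s => (pyProduct a).map (fun t =>
          s + ((t.zip coeffs).map (fun pr => pr.1 * pr.2)).sum)) := by
  induction a generalizing coeffs acc with
  | nil => simp [pyProduct]
  | cons a1 rest ih =>
    cases coeffs with
    | nil => simp at h
    | cons c crest =>
      simp only [List.zip_cons_cons, List.foldl_cons]
      rw [ih _ _ (by simpa using h)]
      simp only [pyProduct, List.flatMap_assoc, List.flatMap_map, List.map_flatMap,
        List.map_map]
      congr 1; funext s; congr 1; funext v; congr 1; funext t
      simp [List.zip_cons_cons]
      ring

-- A's mod-of-dot map over the full product equals B's mod map over the DP sums; residue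
-- lists beyond the moduli must be singletons (the zip ignores them, the product repeats them)
theorem pvMapModEq (a : List (List Int)) (coeffs : List Int) (p : Int)
    (hone : ∀ ai ∈ a.drop coeffs.length, ai.length = 1) :
    (pyProduct a).map (fun t => PySem.Int.mod ((t.zip coeffs).map (fun pr => pr.1 * pr.2)).sum p)
      = ((a.zip coeffs).foldl
          (fun sums pr => sums.flatMap (fun s => pr.1.map (fun v => s + v * pr.2))) [0]).map
        (fun s => PySem.Int.mod s p) := by
  rcases Nat.lt_or_ge coeffs.length a.length with hk | hk
  case inr =>
    rw [pvDp_eq a coeffs [0] hk]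
    simp [Function.comp_def]
  case inl =>
    obtain ⟨u, hu⟩ := pvProdSingles _ hone
    have hlen1 : (a.take coeffs.length).length = coeffs.length := by
      simp [List.length_take]; omega
    have hzip : a.zip coeffs = (a.take coeffs.length).zip coeffs := by
      conv_lhs => rw [← List.take_append_drop coeffs.length a]
      rw [pvZipAppend, hlen1, List.drop_length]
      simp
    rw [hzip, pvDp_eq _ coeffs [0] (by omega)]
    conv_lhs => rw [← List.take_append_drop coeffs.length a]
    rw [pvProdAppend, hu]
    simp only [List.map_cons, List.map_nil, List.map_flatMap]
    rw [← List.map_eq_flatMap]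
    simp only [List.flatMap_cons, List.flatMap_nil, List.append_nil, zero_add, List.map_map,
      Function.comp_def]
    apply List.map_congr_left
    intro t ht
    have hlt : t.length = coeffs.length := by rw [pvProdLen _ t ht, hlen1]
    rw [pvZipAppend, hlt, List.drop_length]
    simp

-- ===== VERDICT (by name: the statement is the Claim_ definition above) =====
theorem multivalued_chinese_remainder_spec : Claim_equal_multivalued_chinese_remainder := by
  intro n a prod _hDom hPre
  obtain ⟨-, hbr⟩ := hPre
  unfold Spec_multivalued_chinese_remainder
  unfold multivalued_chinese_remainder multivalued_chinese_remainder_alt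
  have hcond : ∀ ai : List Int, (ai.length == 0) = ai.isEmpty := by
    intro ai; cases ai <;> simp
  simp only [hcond]
  split
  · rfl
  · rename_i hne
    rcases hbr with hemp | ⟨-, -, hone⟩
    · exfalso
      simp only [List.any_eq_true, List.isEmpty_iff, not_exists, not_and] at hne
      obtain ⟨ai, hai, rfl⟩ := hemp
      exact hne [] hai rfl
    · rw [PySem.List.foldl_append_singleton_eq_map]
      simp only [modulo_inv_eq, List.nil_append]
      rw [pvMapModEq _ _ _ (by simpa using hone)]
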